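-- pv_equiv track=rewrite | github.com/aaroy13/ttsky-glitch-gen | test/test.py | fb_bit
-- ===== SOURCE A (Python) =====
-- def fb_bit(l, mode):
--     b = [(l >> i) & 1 for i in range(8)]
--     if mode == 0:
--         return b[7] ^ b[5] ^ b[4] ^ b[3]
--     if mode == 1:
--         return b[7] ^ b[6] ^ b[5] ^ b[1]
--     if mode == 2:
--         return b[7] ^ b[2] ^ b[1] ^ b[0]
--     return b[7] ^ b[4] ^ b[2] ^ b[1]
-- ===== SOURCE B (Python) =====
-- _TAPS = {0: 0xB8, 1: 0xE2, 2: 0x87}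
--
-- def fb_bit(l, mode):
--     mask = _TAPS.get(mode, 0x96)
--     return bin((l % 256) & mask).count('1') & 1
-- ===== Notes on version B (the rewrite author's own statement) =====
-- stated objective: simpler
-- what changed: Replaces the eight-element bit list and per-mode XOR of four named bit positions with a per-mode tap mask looked up in a dict and the popcount parity of the masked low byte.
import Mathlib
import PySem

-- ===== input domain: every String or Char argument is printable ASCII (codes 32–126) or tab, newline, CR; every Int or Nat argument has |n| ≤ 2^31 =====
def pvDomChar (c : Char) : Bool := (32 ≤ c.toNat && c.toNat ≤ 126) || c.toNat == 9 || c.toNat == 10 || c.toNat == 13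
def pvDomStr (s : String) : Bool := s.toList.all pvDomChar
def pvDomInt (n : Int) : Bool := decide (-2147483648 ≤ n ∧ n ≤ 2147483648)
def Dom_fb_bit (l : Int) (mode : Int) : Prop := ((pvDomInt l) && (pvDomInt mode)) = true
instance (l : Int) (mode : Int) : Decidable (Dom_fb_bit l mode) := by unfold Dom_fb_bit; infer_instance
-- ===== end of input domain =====

-- B replaces the eight-bit list and branch-per-mode XOR of named bits by a per-mode tap
-- mask looked up in a dict and the popcount parity of the masked byte (objective: simpler).

-- ===== PORT A =====
-- b = [(l >> i) & 1 for i in range(8)]; the b[i] accesses use constant in-range indices,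
-- so pyGet? is always some; .getD 0 only discharges the Option.
def fb_bit (l : Int) (mode : Int) : Int :=
  let b : List Int := (PySem.List.pyRange 0 8 1).map (fun i => PySem.Int.band (l >>> i) 1)
  if mode = 0 then
    PySem.Int.bxor (PySem.Int.bxor (PySem.Int.bxor ((PySem.List.pyGet? b 7).getD 0) ((PySem.List.pyGet? b 5).getD 0)) ((PySem.List.pyGet? b 4).getD 0)) ((PySem.List.pyGet? b 3).getD 0)
  else if mode = 1 then
    PySem.Int.bxor (PySem.Int.bxor (PySem.Int.bxor ((PySem.List.pyGet? b 7).getD 0) ((PySem.List.pyGet? b 6).getD 0)) ((PySem.List.pyGet? b 5).getD 0)) ((PySem.List.pyGet? b 1).getD 0)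
  else if mode = 2 then
    PySem.Int.bxor (PySem.Int.bxor (PySem.Int.bxor ((PySem.List.pyGet? b 7).getD 0) ((PySem.List.pyGet? b 2).getD 0)) ((PySem.List.pyGet? b 1).getD 0)) ((PySem.List.pyGet? b 0).getD 0)
  else
    PySem.Int.bxor (PySem.Int.bxor (PySem.Int.bxor ((PySem.List.pyGet? b 7).getD 0) ((PySem.List.pyGet? b 4).getD 0)) ((PySem.List.pyGet? b 2).getD 0)) ((PySem.List.pyGet? b 1).getD 0)

-- ===== PORT B =====
-- _TAPS = {0: 0xB8, 1: 0xE2, 2: 0x87}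
def pvTAPS : PySem.Dict Int Int := PySem.Dict.ofList [(0, 0xB8), (1, 0xE2), (2, 0x87)]

-- mask = _TAPS.get(mode, 0x96); return bin((l % 256) & mask).count('1') & 1
-- bin(x).count('1') for the nonnegative x here is the popcount, PySem.Int.bitCount.
def fb_bit_alt (l : Int) (mode : Int) : Int :=
  let mask : Int := PySem.Dict.getD pvTAPS mode 0x96
  PySem.Int.band (PySem.Int.bitCount (PySem.Int.band (PySem.Int.mod l 256) mask) : Int) 1

-- ===== PRECONDITION & SPEC =====
def Spec_fb_bit (l : Int) (mode : Int) (out : Int) : Prop := out = fb_bit_alt l mode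
instance (l : Int) (mode : Int) (out : Int) : Decidable (Spec_fb_bit l mode out) := by unfold Spec_fb_bit; infer_instance

-- ===== CLAIM (what is proved, stated in full; the proofs are below) =====
def Claim_equal_fb_bit : Prop := ∀ (l : Int) (mode : Int), Dom_fb_bit l mode → Spec_fb_bit l mode (fb_bit l mode)

-- ===== LEMMAS AND PROOFS =====

-- A's four-tap XOR expression over bits i j k m of l (indices as Int, as the port's range elements are)
def axpr (l : Int) (i j k m : Nat) : Int :=
  PySem.Int.bxor (PySem.Int.bxor (PySem.Int.bxor (PySem.Int.band (l >>> (i : Int)) 1) (PySem.Int.band (l >>> (j : Int)) 1)) (PySem.Int.band (l >>> (k : Int)) 1)) (PySem.Int.band (l >>> (m : Int)) 1)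

-- B's masked parity expression
def bxpr (l mask : Int) : Int :=
  PySem.Int.band (PySem.Int.bitCount (PySem.Int.band (PySem.Int.mod l 256) mask) : Int) 1

lemma A_eq0 (l : Int) : fb_bit l 0 = axpr l 7 5 4 3 := by
  simp [fb_bit, axpr, show PySem.List.pyRange 0 8 1 = [0,1,2,3,4,5,6,7] from by decide,
        PySem.List.pyGet?, PySem.List.pyIdx?]
lemma A_eq1 (l : Int) : fb_bit l 1 = axpr l 7 6 5 1 := by
  simp [fb_bit, axpr, show PySem.List.pyRange 0 8 1 = [0,1,2,3,4,5,6,7] from by decide,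
        PySem.List.pyGet?, PySem.List.pyIdx?]
lemma A_eq2 (l : Int) : fb_bit l 2 = axpr l 7 2 1 0 := by
  simp [fb_bit, axpr, show PySem.List.pyRange 0 8 1 = [0,1,2,3,4,5,6,7] from by decide,
        PySem.List.pyGet?, PySem.List.pyIdx?]
lemma A_else (l mode : Int) (h0 : mode ≠ 0) (h1 : mode ≠ 1) (h2 : mode ≠ 2) :
    fb_bit l mode = axpr l 7 4 2 1 := by
  unfold fb_bit
  rw [if_neg h0, if_neg h1, if_neg h2]
  simp [axpr, show PySem.List.pyRange 0 8 1 = [0,1,2,3,4,5,6,7] from by decide,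
        PySem.List.pyGet?, PySem.List.pyIdx?]

lemma B_eq0 (l : Int) : fb_bit_alt l 0 = bxpr l 0xB8 := rfl
lemma B_eq1 (l : Int) : fb_bit_alt l 1 = bxpr l 0xE2 := rfl
lemma B_eq2 (l : Int) : fb_bit_alt l 2 = bxpr l 0x87 := rfl
lemma B_else (l mode : Int) (h0 : mode ≠ 0) (h1 : mode ≠ 1) (h2 : mode ≠ 2) :
    fb_bit_alt l mode = bxpr l 0x96 := by
  unfold fb_bit_alt bxpr pvTAPS
  simp [PySem.Dict.getD, PySem.Dict.get?, PySem.Dict.ofList, PySem.Dict.empty,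
        PySem.Dict.update, PySem.Dict.insert, beq_iff_eq,
        Ne.symm h0, Ne.symm h1, Ne.symm h2]

-- bit i of l only depends on l mod 256, for i < 8
lemma band1_low (l : Int) (i : Nat) (h : i < 8) :
    PySem.Int.band (l >>> (i : Int)) 1 = PySem.Int.band ((l % 256) >>> (i : Int)) 1 := by
  rw [Int.shiftRight_natCast_right, Int.shiftRight_natCast_right,
      PySem.Int.band_one, PySem.Int.band_one,
      PySem.Int.mod_eq_emod_of_pos (a := l >>> i) (by norm_num),
      PySem.Int.mod_eq_emod_of_pos (a := (l % 256) >>> i) (by norm_num),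
      Int.shiftRight_eq_div_pow, Int.shiftRight_eq_div_pow]
  interval_cases i <;> norm_num <;> omega

lemma axpr_mod (l : Int) (i j k m : Nat) (hi : i < 8) (hj : j < 8) (hk : k < 8) (hm : m < 8) :
    axpr l i j k m = axpr (l % 256) i j k m := by
  unfold axpr
  rw [band1_low l i hi, band1_low l j hj, band1_low l k hk, band1_low l m hm]

lemma bxpr_mod (l mask : Int) : bxpr l mask = bxpr (l % 256) mask := by
  unfold bxpr
  rw [PySem.Int.mod_eq_emod_of_pos (a := l) (by norm_num),
      PySem.Int.mod_eq_emod_of_pos (a := l % 256) (by norm_num),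
      Int.emod_emod_of_dvd _ (by norm_num)]

set_option maxRecDepth 8192 in
lemma key0 : ∀ n : Fin 256, axpr (n.val : Int) 7 5 4 3 = bxpr (n.val : Int) 0xB8 := by decide
set_option maxRecDepth 8192 in
lemma key1 : ∀ n : Fin 256, axpr (n.val : Int) 7 6 5 1 = bxpr (n.val : Int) 0xE2 := by decide
set_option maxRecDepth 8192 in
lemma key2 : ∀ n : Fin 256, axpr (n.val : Int) 7 2 1 0 = bxpr (n.val : Int) 0x87 := by decide
set_option maxRecDepth 8192 in
lemma key3 : ∀ n : Fin 256, axpr (n.val : Int) 7 4 2 1 = bxpr (n.val : Int) 0x96 := by decide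

lemma as_fin (l : Int) : ∃ n : Fin 256, l % 256 = (n.val : Int) := by
  refine ⟨⟨(l % 256).toNat, by omega⟩, by simp; omega⟩

-- ===== VERDICT (by name: the statement is the Claim_ definition above) =====
theorem fb_bit_spec : Claim_equal_fb_bit := by
  intro l mode _
  unfold Spec_fb_bit
  obtain ⟨n, hn⟩ := as_fin l
  by_cases h0 : mode = 0
  · subst h0
    rw [A_eq0, B_eq0, axpr_mod l 7 5 4 3 (by omega) (by omega) (by omega) (by omega),
        bxpr_mod, hn]
    exact key0 n
  by_cases h1 : mode = 1
  · subst h1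
    rw [A_eq1, B_eq1, axpr_mod l 7 6 5 1 (by omega) (by omega) (by omega) (by omega),
        bxpr_mod, hn]
    exact key1 n
  by_cases h2 : mode = 2
  · subst h2
    rw [A_eq2, B_eq2, axpr_mod l 7 2 1 0 (by omega) (by omega) (by omega) (by omega),
        bxpr_mod, hn]
    exact key2 n
  · rw [A_else l mode h0 h1 h2, B_else l mode h0 h1 h2,
        axpr_mod l 7 4 2 1 (by omega) (by omega) (by omega) (by omega), bxpr_mod, hn]
    exact key3 n
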